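-- pv_equiv track=rewrite | github.com/LeanderQ/edge-matching-solver | solver.py | rotate_card
-- ===== SOURCE A (Python) =====
-- from typing import List, Tuple, Optional
--
-- def rotate_card(card: List[List[str]], rotations: int) -> List[List[str]]:
--     """
--     Rotate a card clockwise by the specified number of 90-degree rotations.
--
--     Args:
--         card: A card represented as [top, right, bottom, left]
--         rotations: Number of clockwise 90-degree rotations (0-3)
--
--     Returns:
--         The rotated card
--     """
--     rotations = rotations % 4
--     if rotations == 0:
--         return card.copy()
--
--     # Rotate clockwise: top->right, right->bottom, bottom->left, left->top
--     rotated = card.copy()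
--     for _ in range(rotations):
--         rotated = [rotated[3], rotated[0], rotated[1], rotated[2]]
--
--     return rotated
-- ===== SOURCE B (Python) =====
-- from typing import List
--
-- def rotate_card(card: List[List[str]], rotations: int) -> List[List[str]]:
--     r = rotations % 4
--     if r == 0:
--         return card.copy()
--     sides = card[:4]
--     return sides[-r:] + sides[:-r]
-- ===== Notes on version B (the rewrite author's own statement) =====
-- stated objective: idiomatic
-- what changed: Replaces the per-step list rebuild loop with a single closed-form slice rotation of the card's four sides: sides[-r:] + sides[:-r] with r = rotations % 4.
import Mathlib
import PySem

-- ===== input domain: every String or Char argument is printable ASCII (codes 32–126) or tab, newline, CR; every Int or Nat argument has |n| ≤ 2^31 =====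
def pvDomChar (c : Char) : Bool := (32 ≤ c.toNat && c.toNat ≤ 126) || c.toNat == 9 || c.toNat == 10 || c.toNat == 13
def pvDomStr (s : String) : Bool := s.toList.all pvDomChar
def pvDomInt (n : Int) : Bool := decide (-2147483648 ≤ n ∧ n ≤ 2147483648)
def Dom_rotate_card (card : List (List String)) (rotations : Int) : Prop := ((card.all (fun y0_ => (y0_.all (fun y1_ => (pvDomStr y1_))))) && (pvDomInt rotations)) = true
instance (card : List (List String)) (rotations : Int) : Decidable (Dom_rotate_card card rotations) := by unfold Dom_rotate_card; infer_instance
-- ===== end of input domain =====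

-- B replaces A's per-step rebuild loop with a single closed-form slice rotation (idiomatic).

-- ===== PORT A =====
def rotate_card (card : List (List String)) (rotations : Int) : List (List String) :=
  let rotations := PySem.Int.mod rotations 4
  if rotations = 0 then card
  else
    -- for _ in range(rotations): rotated = [rotated[3], rotated[0], rotated[1], rotated[2]]
    (PySem.List.pyRange 0 rotations 1).foldl
      (fun rotated _ =>
        [PySem.List.pyGetD rotated 3 [], PySem.List.pyGetD rotated 0 [],
         PySem.List.pyGetD rotated 1 [], PySem.List.pyGetD rotated 2 []])
      card

-- ===== PORT B =====
def rotate_card_alt (card : List (List String)) (rotations : Int) : List (List String) :=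
  let r := PySem.Int.mod rotations 4
  if r = 0 then card
  else
    let sides := PySem.List.slice card none (some 4)
    PySem.List.slice sides (some (-r)) none ++ PySem.List.slice sides none (some (-r))

-- ===== PRECONDITION & SPEC =====
-- Pre_ excludes lists with fewer than 4 elements when rotations % 4 ≠ 0: there A raises IndexError.
def Pre_rotate_card (card : List (List String)) (rotations : Int) : Prop :=
  PySem.Int.mod rotations 4 = 0 ∨ 4 ≤ card.length
instance (card : List (List String)) (rotations : Int) : Decidable (Pre_rotate_card card rotations) := by unfold Pre_rotate_card; infer_instance
def pvWitness_rotate_card : List (List String) × Int := ([["t"], ["r"], ["b"], ["l"]], 3)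

def Spec_rotate_card (card : List (List String)) (rotations : Int) (out : List (List String)) : Prop := out = rotate_card_alt card rotations
instance (card : List (List String)) (rotations : Int) (out : List (List String)) : Decidable (Spec_rotate_card card rotations out) := by unfold Spec_rotate_card; infer_instance

-- ===== CLAIM (what is proved, stated in full; the proofs are below) =====
def Claim_equal_rotate_card : Prop := ∀ (card : List (List String)) (rotations : Int), Dom_rotate_card card rotations → Pre_rotate_card card rotations → Spec_rotate_card card rotations (rotate_card card rotations)

-- ===== LEMMAS AND PROOFS =====

-- ===== VERDICT (by name: the statement is the Claim_ definition above) =====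
theorem rotate_card_spec : Claim_equal_rotate_card := by
  intro card rotations _ hpre
  unfold Spec_rotate_card rotate_card rotate_card_alt
  have h0 : 0 ≤ PySem.Int.mod rotations 4 := PySem.Int.mod_nonneg rotations (by norm_num)
  have h4 : PySem.Int.mod rotations 4 < 4 := PySem.Int.mod_lt rotations (by norm_num)
  set r := PySem.Int.mod rotations 4 with hr
  by_cases hz : r = 0
  · simp [hz]
  · have hlen : 4 ≤ card.length := by
      rcases hpre with h | h
      · exact absurd (hr ▸ h) hz
      · exact h
    obtain ⟨a, b, c, d, rest, rfl⟩ : ∃ a b c d rest, card = a :: b :: c :: d :: rest := by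
      rcases card with _ | ⟨a, _ | ⟨b, _ | ⟨c, _ | ⟨d, rest⟩⟩⟩⟩ <;>
        first
          | exact ⟨a, b, c, d, rest, rfl⟩
          | (exfalso; revert hlen; simp)
    interval_cases r
    · exact absurd rfl hz
    · simp [show PySem.List.pyRange 0 1 1 = [0] from by decide, List.foldl,
            PySem.List.pyGetD, PySem.List.pyGet?, PySem.List.pyIdx?,
            PySem.List.slice, PySem.List.clampIdx, List.take_succ_cons]
    · simp [show PySem.List.pyRange 0 2 1 = [0, 1] from by decide, List.foldl,
            PySem.List.pyGetD, PySem.List.pyGet?, PySem.List.pyIdx?,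
            PySem.List.slice, PySem.List.clampIdx, List.take_succ_cons]
    · simp [show PySem.List.pyRange 0 3 1 = [0, 1, 2] from by decide, List.foldl,
            PySem.List.pyGetD, PySem.List.pyGet?, PySem.List.pyIdx?,
            PySem.List.slice, PySem.List.clampIdx, List.take_succ_cons]
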